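-- pv_equiv track=rewrite | github.com/qiuda16/Dr.moto | bff/app/routers/ai_ops.py | _source_hints_for_domains
-- ===== SOURCE A (Python) =====
-- def _source_hints_for_domains(domains: list[str]) -> list[str]:
--     ordered: list[str] = []
--
--     def add(value: str) -> None:
--         if value not in ordered:
--             ordered.append(value)
--
--     for domain in domains:
--         if domain == "customer":
--             add("bff.customer")
--             add("odoo.res.partner")
--         elif domain == "vehicle":
--             add("bff.vehicle")
--             add("odoo.partner_vehicle")
--         elif domain == "work_order":
--             add("bff.work_order")
--             add("odoo.work_order")
--         elif domain == "catalog":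
--             add("bff.vehicle_catalog")
--         elif domain == "parts_inventory":
--             add("bff.parts")
--             add("odoo.inventory")
--         elif domain == "knowledge":
--             add("bff.knowledge")
--             add("ai.kb")
--         elif domain == "store_ops":
--             add("bff.dashboard")
--         elif domain == "project_system":
--             add("ai.project_brain")
--             add("ai.project_ontology")
--     return ordered
-- ===== SOURCE B (Python) =====
-- _HINTS = {
--     "customer": ["bff.customer", "odoo.res.partner"],
--     "vehicle": ["bff.vehicle", "odoo.partner_vehicle"],
--     "work_order": ["bff.work_order", "odoo.work_order"],
--     "catalog": ["bff.vehicle_catalog"],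
--     "parts_inventory": ["bff.parts", "odoo.inventory"],
--     "knowledge": ["bff.knowledge", "ai.kb"],
--     "store_ops": ["bff.dashboard"],
--     "project_system": ["ai.project_brain", "ai.project_ontology"],
-- }
--
--
-- def _source_hints_for_domains(domains: list[str]) -> list[str]:
--     # The per-domain hint lists are pairwise disjoint and duplicate-free, so
--     # duplicates can only come from repeated domains: dedup the DOMAINS with a
--     # seen-set and extend the output unconditionally, instead of testing each
--     # hint against the growing output list.
--     ordered: list[str] = []
--     seen: set[str] = set()
--     for domain in domains:
--         if domain not in seen:
--             seen.add(domain)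
--             ordered.extend(_HINTS.get(domain, []))
--     return ordered
-- ===== Notes on version B (the rewrite author's own statement) =====
-- stated objective: alternative
-- what changed: Instead of testing every hint against the growing output list under an if/elif chain, B dedups the domains themselves with a seen-set and extends the output unconditionally from a domain-to-hints table, which is valid because the per-domain hint lists are pairwise disjoint and duplicate-free.
import Mathlib
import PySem

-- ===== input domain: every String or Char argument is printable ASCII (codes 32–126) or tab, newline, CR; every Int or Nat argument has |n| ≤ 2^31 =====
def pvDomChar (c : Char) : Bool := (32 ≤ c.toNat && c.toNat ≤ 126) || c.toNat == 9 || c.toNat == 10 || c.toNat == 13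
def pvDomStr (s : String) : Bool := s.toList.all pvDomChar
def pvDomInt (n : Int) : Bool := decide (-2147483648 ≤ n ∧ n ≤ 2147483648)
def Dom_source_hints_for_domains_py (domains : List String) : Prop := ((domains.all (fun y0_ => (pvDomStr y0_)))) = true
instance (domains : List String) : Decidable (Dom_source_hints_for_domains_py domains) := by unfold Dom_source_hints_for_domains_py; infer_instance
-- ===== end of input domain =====

-- B dedups the DOMAINS with a seen-set and extends the output unconditionally from a
-- domain→hints table (valid because the per-domain hint lists are pairwise disjoint and
-- duplicate-free), instead of A's per-hint membership test against the growing output list.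

-- ===== PORT A =====
-- A's inner helper `add`: append value only if not already present.
def pvAddHint (ordered : List String) (value : String) : List String :=
  if value ∈ ordered then ordered else ordered ++ [value]

-- A's loop body (the if/elif chain).
def pvStepA (ordered : List String) (domain : String) : List String :=
  if domain = "customer" then pvAddHint (pvAddHint ordered "bff.customer") "odoo.res.partner"
  else if domain = "vehicle" then pvAddHint (pvAddHint ordered "bff.vehicle") "odoo.partner_vehicle"
  else if domain = "work_order" then pvAddHint (pvAddHint ordered "bff.work_order") "odoo.work_order"
  else if domain = "catalog" then pvAddHint ordered "bff.vehicle_catalog"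
  else if domain = "parts_inventory" then pvAddHint (pvAddHint ordered "bff.parts") "odoo.inventory"
  else if domain = "knowledge" then pvAddHint (pvAddHint ordered "bff.knowledge") "ai.kb"
  else if domain = "store_ops" then pvAddHint ordered "bff.dashboard"
  else if domain = "project_system" then pvAddHint (pvAddHint ordered "ai.project_brain") "ai.project_ontology"
  else ordered

def source_hints_for_domains_py (domains : List String) : List String :=
  domains.foldl pvStepA []

-- ===== PORT B =====
def pvHintsTable : PySem.Dict String (List String) :=
  PySem.Dict.ofList
    [ ("customer", ["bff.customer", "odoo.res.partner"])
    , ("vehicle", ["bff.vehicle", "odoo.partner_vehicle"])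
    , ("work_order", ["bff.work_order", "odoo.work_order"])
    , ("catalog", ["bff.vehicle_catalog"])
    , ("parts_inventory", ["bff.parts", "odoo.inventory"])
    , ("knowledge", ["bff.knowledge", "ai.kb"])
    , ("store_ops", ["bff.dashboard"])
    , ("project_system", ["ai.project_brain", "ai.project_ontology"]) ]

-- B's loop body: state = (ordered, seen).
def pvStepB (st : List String × PySem.Set String) (domain : String) : List String × PySem.Set String :=
  if PySem.Set.contains st.2 domain then st
  else (st.1 ++ PySem.Dict.getD pvHintsTable domain [], PySem.Set.add st.2 domain)

def source_hints_for_domains_py_alt (domains : List String) : List String :=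
  (domains.foldl pvStepB ([], PySem.Set.empty)).1

-- ===== PRECONDITION & SPEC =====
def Spec_source_hints_for_domains_py (domains : List String) (out : List String) : Prop := out = source_hints_for_domains_py_alt domains
instance (domains : List String) (out : List String) : Decidable (Spec_source_hints_for_domains_py domains out) := by unfold Spec_source_hints_for_domains_py; infer_instance

-- ===== CLAIM =====
def Claim_equal_source_hints_for_domains_py : Prop := ∀ (domains : List String), Dom_source_hints_for_domains_py domains → Spec_source_hints_for_domains_py domains (source_hints_for_domains_py domains)

-- ===== LEMMAS AND PROOFS =====

-- Invariant tying A's accumulator to B's seen-set: each hint is in `ordered`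
-- exactly when its domain is in `seen`.
def pvInv (ordered seen : List String) : Prop :=
  ("customer" ∈ seen ↔ "bff.customer" ∈ ordered) ∧
  ("customer" ∈ seen ↔ "odoo.res.partner" ∈ ordered) ∧
  ("vehicle" ∈ seen ↔ "bff.vehicle" ∈ ordered) ∧
  ("vehicle" ∈ seen ↔ "odoo.partner_vehicle" ∈ ordered) ∧
  ("work_order" ∈ seen ↔ "bff.work_order" ∈ ordered) ∧
  ("work_order" ∈ seen ↔ "odoo.work_order" ∈ ordered) ∧
  ("catalog" ∈ seen ↔ "bff.vehicle_catalog" ∈ ordered) ∧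
  ("parts_inventory" ∈ seen ↔ "bff.parts" ∈ ordered) ∧
  ("parts_inventory" ∈ seen ↔ "odoo.inventory" ∈ ordered) ∧
  ("knowledge" ∈ seen ↔ "bff.knowledge" ∈ ordered) ∧
  ("knowledge" ∈ seen ↔ "ai.kb" ∈ ordered) ∧
  ("store_ops" ∈ seen ↔ "bff.dashboard" ∈ ordered) ∧
  ("project_system" ∈ seen ↔ "ai.project_brain" ∈ ordered) ∧
  ("project_system" ∈ seen ↔ "ai.project_ontology" ∈ ordered)

theorem pv_getD_other (domain : String)
    (h1 : domain ≠ "customer") (h2 : domain ≠ "vehicle") (h3 : domain ≠ "work_order")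
    (h4 : domain ≠ "catalog") (h5 : domain ≠ "parts_inventory") (h6 : domain ≠ "knowledge")
    (h7 : domain ≠ "store_ops") (h8 : domain ≠ "project_system") :
    PySem.Dict.getD pvHintsTable domain [] = [] := by
  have e1 : (("customer" : String) == domain) = false := by simp [Ne.symm h1]
  have e2 : (("vehicle" : String) == domain) = false := by simp [Ne.symm h2]
  have e3 : (("work_order" : String) == domain) = false := by simp [Ne.symm h3]
  have e4 : (("catalog" : String) == domain) = false := by simp [Ne.symm h4]
  have e5 : (("parts_inventory" : String) == domain) = false := by simp [Ne.symm h5]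
  have e6 : (("knowledge" : String) == domain) = false := by simp [Ne.symm h6]
  have e7 : (("store_ops" : String) == domain) = false := by simp [Ne.symm h7]
  have e8 : (("project_system" : String) == domain) = false := by simp [Ne.symm h8]
  have hit : pvHintsTable.items =
      [ ("customer", ["bff.customer", "odoo.res.partner"])
      , ("vehicle", ["bff.vehicle", "odoo.partner_vehicle"])
      , ("work_order", ["bff.work_order", "odoo.work_order"])
      , ("catalog", ["bff.vehicle_catalog"])
      , ("parts_inventory", ["bff.parts", "odoo.inventory"])
      , ("knowledge", ["bff.knowledge", "ai.kb"])
      , ("store_ops", ["bff.dashboard"])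
      , ("project_system", ["ai.project_brain", "ai.project_ontology"]) ] := rfl
  simp [PySem.Dict.getD, PySem.Dict.get?, hit, List.find?,
    e1, e2, e3, e4, e5, e6, e7, e8]

-- One step preserves the relation: A's new accumulator equals B's new output,
-- and the invariant carries over.
theorem pv_step (ordered seen : List String) (domain : String) (h : pvInv ordered seen) :
    pvStepA ordered domain = (pvStepB (ordered, seen) domain).1 ∧
    pvInv (pvStepA ordered domain) (pvStepB (ordered, seen) domain).2 := by
  obtain ⟨i1, i2, i3, i4, i5, i6, i7, i8, i9, i10, i11, i12, i13, i14⟩ := h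
  by_cases d1 : domain = "customer"
  · subst d1
    by_cases hc : ("customer" : String) ∈ seen
    · have hcc : PySem.Set.contains seen "customer" = true := (PySem.Set.contains_iff seen _).mpr hc
      have m1 := i1.mp hc
      have m2 := i2.mp hc
      refine ⟨?_, ?_⟩ <;> simp_all [pvStepA, pvStepB, pvAddHint, pvInv]
    · have hcc : PySem.Set.contains seen "customer" = false := by
        by_contra hne
        exact hc ((PySem.Set.contains_iff seen _).mp (by simpa using hne))
      have hadd : PySem.Set.add seen "customer" = seen ++ ["customer"] := PySem.Set.add_of_not_mem hc
      have n1 : ("bff.customer" : String) ∉ ordered := fun m => hc (i1.mpr m)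
      have n2 : ("odoo.res.partner" : String) ∉ ordered := fun m => hc (i2.mpr m)
      refine ⟨?_, ?_⟩ <;>
        simp_all [pvStepA, pvStepB, pvAddHint, pvInv, List.mem_append,
          show PySem.Dict.getD pvHintsTable "customer" [] = ["bff.customer", "odoo.res.partner"] from rfl]
  by_cases d2 : domain = "vehicle"
  · subst d2
    by_cases hc : ("vehicle" : String) ∈ seen
    · have hcc : PySem.Set.contains seen "vehicle" = true := (PySem.Set.contains_iff seen _).mpr hc
      have m1 := i3.mp hc
      have m2 := i4.mp hc
      refine ⟨?_, ?_⟩ <;> simp_all [pvStepA, pvStepB, pvAddHint, pvInv]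
    · have hcc : PySem.Set.contains seen "vehicle" = false := by
        by_contra hne
        exact hc ((PySem.Set.contains_iff seen _).mp (by simpa using hne))
      have hadd : PySem.Set.add seen "vehicle" = seen ++ ["vehicle"] := PySem.Set.add_of_not_mem hc
      have n1 : ("bff.vehicle" : String) ∉ ordered := fun m => hc (i3.mpr m)
      have n2 : ("odoo.partner_vehicle" : String) ∉ ordered := fun m => hc (i4.mpr m)
      refine ⟨?_, ?_⟩ <;>
        simp_all [pvStepA, pvStepB, pvAddHint, pvInv, List.mem_append,
          show PySem.Dict.getD pvHintsTable "vehicle" [] = ["bff.vehicle", "odoo.partner_vehicle"] from rfl]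
  by_cases d3 : domain = "work_order"
  · subst d3
    by_cases hc : ("work_order" : String) ∈ seen
    · have hcc : PySem.Set.contains seen "work_order" = true := (PySem.Set.contains_iff seen _).mpr hc
      have m1 := i5.mp hc
      have m2 := i6.mp hc
      refine ⟨?_, ?_⟩ <;> simp_all [pvStepA, pvStepB, pvAddHint, pvInv]
    · have hcc : PySem.Set.contains seen "work_order" = false := by
        by_contra hne
        exact hc ((PySem.Set.contains_iff seen _).mp (by simpa using hne))
      have hadd : PySem.Set.add seen "work_order" = seen ++ ["work_order"] := PySem.Set.add_of_not_mem hc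
      have n1 : ("bff.work_order" : String) ∉ ordered := fun m => hc (i5.mpr m)
      have n2 : ("odoo.work_order" : String) ∉ ordered := fun m => hc (i6.mpr m)
      refine ⟨?_, ?_⟩ <;>
        simp_all [pvStepA, pvStepB, pvAddHint, pvInv, List.mem_append,
          show PySem.Dict.getD pvHintsTable "work_order" [] = ["bff.work_order", "odoo.work_order"] from rfl]
  by_cases d4 : domain = "catalog"
  · subst d4
    by_cases hc : ("catalog" : String) ∈ seen
    · have hcc : PySem.Set.contains seen "catalog" = true := (PySem.Set.contains_iff seen _).mpr hc
      have m1 := i7.mp hc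
      refine ⟨?_, ?_⟩ <;> simp_all [pvStepA, pvStepB, pvAddHint, pvInv]
    · have hcc : PySem.Set.contains seen "catalog" = false := by
        by_contra hne
        exact hc ((PySem.Set.contains_iff seen _).mp (by simpa using hne))
      have hadd : PySem.Set.add seen "catalog" = seen ++ ["catalog"] := PySem.Set.add_of_not_mem hc
      have n1 : ("bff.vehicle_catalog" : String) ∉ ordered := fun m => hc (i7.mpr m)
      refine ⟨?_, ?_⟩ <;>
        simp_all [pvStepA, pvStepB, pvAddHint, pvInv, List.mem_append,
          show PySem.Dict.getD pvHintsTable "catalog" [] = ["bff.vehicle_catalog"] from rfl]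
  by_cases d5 : domain = "parts_inventory"
  · subst d5
    by_cases hc : ("parts_inventory" : String) ∈ seen
    · have hcc : PySem.Set.contains seen "parts_inventory" = true := (PySem.Set.contains_iff seen _).mpr hc
      have m1 := i8.mp hc
      have m2 := i9.mp hc
      refine ⟨?_, ?_⟩ <;> simp_all [pvStepA, pvStepB, pvAddHint, pvInv]
    · have hcc : PySem.Set.contains seen "parts_inventory" = false := by
        by_contra hne
        exact hc ((PySem.Set.contains_iff seen _).mp (by simpa using hne))
      have hadd : PySem.Set.add seen "parts_inventory" = seen ++ ["parts_inventory"] := PySem.Set.add_of_not_mem hc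
      have n1 : ("bff.parts" : String) ∉ ordered := fun m => hc (i8.mpr m)
      have n2 : ("odoo.inventory" : String) ∉ ordered := fun m => hc (i9.mpr m)
      refine ⟨?_, ?_⟩ <;>
        simp_all [pvStepA, pvStepB, pvAddHint, pvInv, List.mem_append,
          show PySem.Dict.getD pvHintsTable "parts_inventory" [] = ["bff.parts", "odoo.inventory"] from rfl]
  by_cases d6 : domain = "knowledge"
  · subst d6
    by_cases hc : ("knowledge" : String) ∈ seen
    · have hcc : PySem.Set.contains seen "knowledge" = true := (PySem.Set.contains_iff seen _).mpr hc
      have m1 := i10.mp hc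
      have m2 := i11.mp hc
      refine ⟨?_, ?_⟩ <;> simp_all [pvStepA, pvStepB, pvAddHint, pvInv]
    · have hcc : PySem.Set.contains seen "knowledge" = false := by
        by_contra hne
        exact hc ((PySem.Set.contains_iff seen _).mp (by simpa using hne))
      have hadd : PySem.Set.add seen "knowledge" = seen ++ ["knowledge"] := PySem.Set.add_of_not_mem hc
      have n1 : ("bff.knowledge" : String) ∉ ordered := fun m => hc (i10.mpr m)
      have n2 : ("ai.kb" : String) ∉ ordered := fun m => hc (i11.mpr m)
      refine ⟨?_, ?_⟩ <;>
        simp_all [pvStepA, pvStepB, pvAddHint, pvInv, List.mem_append,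
          show PySem.Dict.getD pvHintsTable "knowledge" [] = ["bff.knowledge", "ai.kb"] from rfl]
  by_cases d7 : domain = "store_ops"
  · subst d7
    by_cases hc : ("store_ops" : String) ∈ seen
    · have hcc : PySem.Set.contains seen "store_ops" = true := (PySem.Set.contains_iff seen _).mpr hc
      have m1 := i12.mp hc
      refine ⟨?_, ?_⟩ <;> simp_all [pvStepA, pvStepB, pvAddHint, pvInv]
    · have hcc : PySem.Set.contains seen "store_ops" = false := by
        by_contra hne
        exact hc ((PySem.Set.contains_iff seen _).mp (by simpa using hne))
      have hadd : PySem.Set.add seen "store_ops" = seen ++ ["store_ops"] := PySem.Set.add_of_not_mem hc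
      have n1 : ("bff.dashboard" : String) ∉ ordered := fun m => hc (i12.mpr m)
      refine ⟨?_, ?_⟩ <;>
        simp_all [pvStepA, pvStepB, pvAddHint, pvInv, List.mem_append,
          show PySem.Dict.getD pvHintsTable "store_ops" [] = ["bff.dashboard"] from rfl]
  by_cases d8 : domain = "project_system"
  · subst d8
    by_cases hc : ("project_system" : String) ∈ seen
    · have hcc : PySem.Set.contains seen "project_system" = true := (PySem.Set.contains_iff seen _).mpr hc
      have m1 := i13.mp hc
      have m2 := i14.mp hc
      refine ⟨?_, ?_⟩ <;> simp_all [pvStepA, pvStepB, pvAddHint, pvInv]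
    · have hcc : PySem.Set.contains seen "project_system" = false := by
        by_contra hne
        exact hc ((PySem.Set.contains_iff seen _).mp (by simpa using hne))
      have hadd : PySem.Set.add seen "project_system" = seen ++ ["project_system"] := PySem.Set.add_of_not_mem hc
      have n1 : ("ai.project_brain" : String) ∉ ordered := fun m => hc (i13.mpr m)
      have n2 : ("ai.project_ontology" : String) ∉ ordered := fun m => hc (i14.mpr m)
      refine ⟨?_, ?_⟩ <;>
        simp_all [pvStepA, pvStepB, pvAddHint, pvInv, List.mem_append,
          show PySem.Dict.getD pvHintsTable "project_system" [] = ["ai.project_brain", "ai.project_ontology"] from rfl]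
  · -- unknown domain: A's chain falls through, B appends the empty hint list
    have hg := pv_getD_other domain d1 d2 d3 d4 d5 d6 d7 d8
    have hA : pvStepA ordered domain = ordered := by
      simp [pvStepA, d1, d2, d3, d4, d5, d6, d7, d8]
    by_cases hc : domain ∈ seen
    · have hcc : PySem.Set.contains seen domain = true := (PySem.Set.contains_iff seen _).mpr hc
      refine ⟨?_, ?_⟩ <;> simp_all [pvStepB, pvInv]
    · have hcc : PySem.Set.contains seen domain = false := by
        by_contra hne
        exact hc ((PySem.Set.contains_iff seen _).mp (by simpa using hne))
      have hadd : PySem.Set.add seen domain = seen ++ [domain] := PySem.Set.add_of_not_mem hc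
      refine ⟨?_, ?_⟩ <;>
        simp_all [pvStepB, pvInv, List.mem_append,
          Ne.symm d1, Ne.symm d2, Ne.symm d3, Ne.symm d4, Ne.symm d5, Ne.symm d6, Ne.symm d7, Ne.symm d8]

theorem pv_fold (domains : List String) (ordered seen : List String) (h : pvInv ordered seen) :
    domains.foldl pvStepA ordered = (domains.foldl pvStepB (ordered, seen)).1 := by
  induction domains generalizing ordered seen with
  | nil => rfl
  | cons d rest ih =>
    have hs := pv_step ordered seen d h
    rcases hp : pvStepB (ordered, seen) d with ⟨o', s'⟩
    have h1 : pvStepA ordered d = o' := by rw [hs.1, hp]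
    have h2 : pvInv o' s' := by have h2' := hs.2; rw [hp] at h2'; rw [h1] at h2'; exact h2'
    rw [List.foldl_cons, List.foldl_cons, h1, hp]
    exact ih o' s' h2

-- ===== VERDICT =====
theorem source_hints_for_domains_py_spec : Claim_equal_source_hints_for_domains_py := by
  intro domains _
  unfold Spec_source_hints_for_domains_py source_hints_for_domains_py source_hints_for_domains_py_alt
  exact pv_fold domains [] [] (by simp [pvInv])
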